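-- pv_equiv track=rewrite | github.com/detonscience/midi_pad_generator18 | midi_chord_generatorV18.py | build_chord
-- ===== SOURCE A (Python) =====
-- def build_chord(scale, degree):
--     needed = max(8, len(scale) * 3)
--     s = []
--     octave_shift = 0
--
--     while len(s) < needed:
--         for note in scale:
--             s.append(note + octave_shift)
--         octave_shift += 12
--
--     degree = degree % len(scale)
--     return [s[degree], s[degree+2], s[degree+4], s[degree+6]]
-- ===== SOURCE B (Python) =====
-- def build_chord(scale, degree):
--     n = len(scale)
--     d = degree % n
--     return [scale[(d + k) % n] + 12 * ((d + k) // n) for k in (0, 2, 4, 6)]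
-- ===== Notes on version B (the rewrite author's own statement) =====
-- stated objective: faster
-- what changed: B computes each of the four chord notes directly as scale[(d+k)%n] + 12*((d+k)//n) instead of materialising the octave-tiled list of length >= max(8, 3*len(scale)) and indexing into it.
-- outside the precondition, e.g. on build_chord([], 0): A does not finish within the time limit, B raises ZeroDivisionError
import Mathlib
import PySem

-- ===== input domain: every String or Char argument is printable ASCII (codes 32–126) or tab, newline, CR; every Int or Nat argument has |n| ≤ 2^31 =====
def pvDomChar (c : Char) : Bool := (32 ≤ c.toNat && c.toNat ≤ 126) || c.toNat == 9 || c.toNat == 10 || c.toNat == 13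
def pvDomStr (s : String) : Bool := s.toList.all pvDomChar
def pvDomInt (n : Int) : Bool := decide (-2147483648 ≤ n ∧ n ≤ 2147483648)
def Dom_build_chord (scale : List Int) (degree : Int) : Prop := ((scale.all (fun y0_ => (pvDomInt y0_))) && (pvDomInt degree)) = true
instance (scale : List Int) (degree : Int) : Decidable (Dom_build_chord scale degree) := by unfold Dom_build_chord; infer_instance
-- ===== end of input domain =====

-- B replaces A's octave-tiled list with a direct index formula scale[(d+k)%n] + 12*((d+k)//n): O(1) instead of O(len(scale)).
-- (Equivalence of RETURN values; neither program mutates its arguments.)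

-- ===== PORT A =====
-- the while-loop of A: keeps appending one octave-shifted copy of scale until len(s) >= needed.
-- The 'scale ≠ []' conjunct only makes the recursion total: on scale = [] Python loops forever (excluded by Pre_).
def buildLoop (scale : List Int) (needed : Nat) (s : List Int) (oct : Int) : List Int :=
  if h : s.length < needed ∧ scale ≠ [] then
    buildLoop scale needed (s ++ scale.map (fun note => note + oct)) (oct + 12)
  else s
termination_by needed - s.length
decreasing_by
  have h2 : 0 < scale.length := List.length_pos_iff.mpr h.2
  simp only [List.length_append, List.length_map, List.length_attach]
  omega

-- pyGetD is exact here: under Pre_ all four indices are in range, so Python's s[i] returns.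
def build_chord (scale : List Int) (degree : Int) : List Int :=
  let needed := max 8 (scale.length * 3)
  let s := buildLoop scale needed [] 0
  let degree2 := PySem.Int.mod degree (scale.length : Int)
  [PySem.List.pyGetD s degree2 0, PySem.List.pyGetD s (degree2 + 2) 0,
   PySem.List.pyGetD s (degree2 + 4) 0, PySem.List.pyGetD s (degree2 + 6) 0]

-- ===== PORT B =====
-- pyGetD is exact here: (d+k) % n is always in [0, n).
def build_chord_alt (scale : List Int) (degree : Int) : List Int :=
  let n : Int := scale.length
  let d := PySem.Int.mod degree n
  ([0, 2, 4, 6] : List Int).map (fun k =>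
    PySem.List.pyGetD scale (PySem.Int.mod (d + k) n) 0 + 12 * PySem.Int.floordiv (d + k) n)

-- ===== PRECONDITION & SPEC =====
-- Pre_ excludes only scale = [], on which A loops forever (and B raises ZeroDivisionError).
def Pre_build_chord (scale : List Int) (degree : Int) : Prop := scale ≠ []
instance (scale : List Int) (degree : Int) : Decidable (Pre_build_chord scale degree) := by unfold Pre_build_chord; infer_instance
def pvWitness_build_chord : List Int × Int := ([0, 2, 4, 5, 7, 9, 11], 3)

def Spec_build_chord (scale : List Int) (degree : Int) (out : List Int) : Prop := out = build_chord_alt scale degree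
instance (scale : List Int) (degree : Int) (out : List Int) : Decidable (Spec_build_chord scale degree out) := by unfold Spec_build_chord; infer_instance

-- ===== CLAIM (what is proved, stated in full; the proofs are below) =====
def Claim_equal_build_chord : Prop := ∀ (scale : List Int) (degree : Int), Dom_build_chord scale degree → Pre_build_chord scale degree → Spec_build_chord scale degree (build_chord scale degree)

-- ===== LEMMAS AND PROOFS =====

-- k full octave copies of scale
def tile (scale : List Int) (k : Nat) : List Int :=
  (List.range k).flatMap (fun j => scale.map (fun x => x + 12 * (j : Int)))

theorem tile_zero (scale : List Int) : tile scale 0 = [] := rfl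


theorem tile_succ (scale : List Int) (k : Nat) :
    tile scale (k + 1) = tile scale k ++ scale.map (fun x => x + 12 * (k : Int)) := by
  simp [tile, List.range_succ]

theorem length_tile (scale : List Int) (k : Nat) :
    (tile scale k).length = k * scale.length := by
  induction k with
  | zero => simp [tile_zero]
  | succ k ih => simp [tile_succ, ih, Nat.succ_mul]

theorem getD_tile (scale : List Int) (K i : Nat) (hi : i < K * scale.length) :
    (tile scale K).getD i 0 =
      scale.getD (i % scale.length) 0 + 12 * ((i / scale.length : Nat) : Int) := by
  induction K with
  | zero => simp at hi
  | succ K ih =>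
    rw [Nat.succ_mul] at hi
    have hn : 0 < scale.length := by
      rcases Nat.eq_zero_or_pos scale.length with h | h
      · rw [h] at hi; omega
      · exact h
    rw [tile_succ]
    by_cases h : i < K * scale.length
    · rw [List.getD_eq_getElem?_getD, List.getElem?_append_left (by rw [length_tile]; exact h),
        ← List.getD_eq_getElem?_getD]
      exact ih h
    · have hKle : K * scale.length ≤ i := Nat.le_of_not_lt h
      obtain ⟨r, hr, hir⟩ : ∃ r, r < scale.length ∧ i = K * scale.length + r :=
        ⟨i - K * scale.length, by omega, by omega⟩
      subst hir
      have hmod : (K * scale.length + r) % scale.length = r := by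
        rw [Nat.mul_add_mod']; exact Nat.mod_eq_of_lt hr
      have hdiv : (K * scale.length + r) / scale.length = K := by
        rw [Nat.mul_comm K, Nat.mul_add_div hn, Nat.div_eq_of_lt hr]; omega
      rw [List.getD_eq_getElem?_getD, List.getElem?_append_right (by rw [length_tile]; omega)]
      rw [length_tile, hmod, hdiv]
      have hsub : K * scale.length + r - K * scale.length = r := by omega
      rw [hsub]
      rw [List.getElem?_map]
      rw [List.getD_eq_getElem?_getD, List.getElem?_eq_getElem hr]
      simp

theorem buildLoop_eq_tile (scale : List Int) (hs : scale ≠ []) (needed m : Nat) :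
    ∃ K, buildLoop scale needed (tile scale m) (12 * m) = tile scale K ∧
      needed ≤ K * scale.length := by
  have hn : 0 < scale.length := List.length_pos_iff.mpr hs
  rw [buildLoop.eq_def]
  by_cases h : (tile scale m).length < needed
  · rw [dif_pos ⟨h, hs⟩]
    have h1 : tile scale m ++ scale.map (fun note => note + 12 * (m : Int)) = tile scale (m + 1) :=
      (tile_succ scale m).symm
    have h2 : (12 : Int) * m + 12 = 12 * ((m + 1 : Nat) : Int) := by push_cast; ring
    rw [h1, h2]
    exact buildLoop_eq_tile scale hs needed (m + 1)
  · rw [dif_neg (by simp [h])]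
    refine ⟨m, rfl, ?_⟩
    rw [length_tile] at h
    omega
termination_by needed - m * scale.length
decreasing_by
  rw [length_tile] at h
  simp only [Nat.add_mul, Nat.one_mul]
  omega

-- one entry of B equals the tile formula, for a Nat index
theorem b_entry (scale : List Int) (i : Nat) :
    PySem.List.pyGetD scale (PySem.Int.mod (i : Int) (scale.length : Int)) 0
      + 12 * PySem.Int.floordiv (i : Int) (scale.length : Int) =
    scale.getD (i % scale.length) 0 + 12 * ((i / scale.length : Nat) : Int) := by
  rw [PySem.Int.mod_natCast, PySem.Int.floordiv_natCast, PySem.List.pyGetD_natCast]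

-- ===== VERDICT (by name: the statement is the Claim_ definition above) =====
theorem build_chord_spec : Claim_equal_build_chord := by
  intro scale degree _ hpre
  unfold Spec_build_chord build_chord build_chord_alt
  have hn : 0 < scale.length := List.length_pos_iff.mpr hpre
  have hnz : (0 : Int) < (scale.length : Int) := by exact_mod_cast hn
  -- the Python-mod degree, as a Nat
  set d : Int := PySem.Int.mod degree (scale.length : Int) with hd
  have hd0 : 0 ≤ d := PySem.Int.mod_nonneg degree hnz
  have hdlt : d < (scale.length : Int) := PySem.Int.mod_lt degree hnz
  obtain ⟨dN, hdN⟩ : ∃ dN : Nat, d = (dN : Int) := ⟨d.toNat, (Int.toNat_of_nonneg hd0).symm⟩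
  have hdNlt : dN < scale.length := by omega
  -- the loop result is a tile big enough for all four indices
  obtain ⟨K, hK, hKn⟩ := buildLoop_eq_tile scale hpre (max 8 (scale.length * 3)) 0
  rw [tile_zero] at hK
  have hKcast : buildLoop scale (max 8 (scale.length * 3)) [] 0 = tile scale K := by
    simpa using hK
  have hbig : dN + 6 < K * scale.length := by
    have : dN + 6 < max 8 (scale.length * 3) := by omega
    omega
  simp only [hKcast, List.map_cons, List.map_nil, add_zero]
  have step : ∀ k : Nat, k ≤ 6 →
      PySem.List.pyGetD (tile scale K) (d + (k : Int)) 0 =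
        PySem.List.pyGetD scale (PySem.Int.mod (d + (k : Int)) (scale.length : Int)) 0
          + 12 * PySem.Int.floordiv (d + (k : Int)) (scale.length : Int) := by
    intro k hk
    have hcast : d + (k : Int) = ((dN + k : Nat) : Int) := by push_cast; omega
    rw [hcast, PySem.List.pyGetD_natCast, b_entry]
    exact getD_tile scale K (dN + k) (by omega)
  have h0 := step 0 (by omega)
  have h2 := step 2 (by omega)
  have h4 := step 4 (by omega)
  have h6 := step 6 (by omega)
  norm_num at h0 h2 h4 h6
  rw [h0, h2, h4, h6]
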